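-- pv_equiv track=rewrite | github.com/humzahkiani/advent-of-code-2025 | day-3/solution.py | part_one
-- ===== SOURCE A (Python) =====
-- def part_one(banks):
--     total_joltage = 0
--
--     for bank in banks:
--         max_digit_and_index = [0,0]
--         num_digits = len(bank)
--
--         for idx in range(0,num_digits-1):
--             digit = bank[idx]
--
--             if digit > max_digit_and_index[0]:
--                 max_digit_and_index = [digit,idx]
--
--         first_digit, first_digit_idx = max_digit_and_index
--         second_digit = max(bank[first_digit_idx+1:])
--
--         bank_max_joltage = int(str(first_digit)+str(second_digit))
--         total_joltage += bank_max_joltage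
--
--     return total_joltage
-- ===== SOURCE B (Python) =====
-- def part_one(banks):
--     total_joltage = 0
--     for bank in banks:
--         rev = bank[::-1]
--         first, second = rev[1], rev[0]
--         suffix_max = max(first, second)
--         for x in rev[2:]:
--             if x >= first:
--                 first, second = x, suffix_max
--             suffix_max = max(suffix_max, x)
--         total_joltage += int(str(first) + str(second))
--     return total_joltage
-- ===== Notes on version B (the rewrite author's own statement) =====
-- stated objective: alternative
-- what changed: Replaces A's left-to-right sentinel-argmax scan followed by a slice and a second max() with a single right-to-left pass over the reversed bank that maintains the (first, second, suffix-max) triple.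
-- outside the precondition, e.g. on part_one([[-5, 3]]): A returns 3, B returns -53; on part_one([[-1, 0, -2]]): A returns 0, B raises ValueError
import Mathlib
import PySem

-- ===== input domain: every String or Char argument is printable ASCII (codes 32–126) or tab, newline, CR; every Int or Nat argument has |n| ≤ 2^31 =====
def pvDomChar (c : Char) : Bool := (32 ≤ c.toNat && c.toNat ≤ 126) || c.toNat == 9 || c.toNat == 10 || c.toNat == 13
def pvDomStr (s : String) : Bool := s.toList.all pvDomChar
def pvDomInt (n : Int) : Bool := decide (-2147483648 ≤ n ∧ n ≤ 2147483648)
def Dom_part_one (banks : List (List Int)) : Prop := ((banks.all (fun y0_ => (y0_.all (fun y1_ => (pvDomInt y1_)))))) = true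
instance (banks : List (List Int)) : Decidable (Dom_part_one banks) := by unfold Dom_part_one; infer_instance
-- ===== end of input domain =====

-- B replaces A's left-to-right sentinel-argmax scan plus slice-and-max with one right-to-left
-- pass over the reversed bank maintaining a (first, second, suffix-max) triple; same cost class.

-- ===== PORT A =====
def part_one (banks : List (List Int)) : Int :=
  banks.foldl (fun total_joltage bank =>
    let num_digits : Int := bank.length
    let mdi : Int × Int :=
      (PySem.List.pyRange 0 (num_digits - 1) 1).foldl
        (fun (mdi : Int × Int) idx =>
          let digit := (PySem.List.pyGet? bank idx).getD 0
          if digit > mdi.1 then (digit, idx) else mdi)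
        (0, 0)
    let second := (PySem.List.max? (PySem.List.slice bank (some (mdi.2 + 1)) none) (fun y => y)).getD 0
    let bank_max_joltage := (PySem.Int.ofChars? (PySem.Int.toChars mdi.1 ++ PySem.Int.toChars second)).getD 0
    total_joltage + bank_max_joltage) 0

-- ===== PORT B =====
def part_one_alt (banks : List (List Int)) : Int :=
  banks.foldl (fun total_joltage bank =>
    let rev := (PySem.List.slice? bank none none (-1)).getD []
    let first := (PySem.List.pyGet? rev 1).getD 0
    let second := (PySem.List.pyGet? rev 0).getD 0
    let suffix_max := max first second
    let st := (PySem.List.slice rev (some 2) none).foldl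
      (fun (st : Int × Int × Int) x =>
        let fs := if x ≥ st.1 then (x, st.2.2) else (st.1, st.2.1)
        (fs.1, fs.2, max st.2.2 x)) (first, second, suffix_max)
    total_joltage + (PySem.Int.ofChars? (PySem.Int.toChars st.1 ++ PySem.Int.toChars st.2.1)).getD 0) 0

-- ===== PRECONDITION & SPEC =====
-- Pre_ excludes banks shorter than 2 (A raises ValueError on max of an empty slice) and banks
-- whose prefix maximum is masked by A's [0,0] sentinel (prefix all ≤ 0 with a negative head) or
-- is followed only by negative values after its first occurrence, where A either raises
-- ValueError (str-concatenation with a negative second number is unparseable) or returns a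
-- sentinel value that B, computing the true prefix maximum, does not reproduce.
def Pre_part_one (banks : List (List Int)) : Prop :=
  ∀ bank ∈ banks, 2 ≤ bank.length ∧
    ((∃ y ∈ bank.dropLast, 0 < y) ∨ 0 ≤ bank.dropLast.headI) ∧
    (∃ y ∈ bank.drop
        (bank.dropLast.findIdx (fun y => decide (∀ z ∈ bank.dropLast, z ≤ y)) + 1), 0 ≤ y)
instance (banks : List (List Int)) : Decidable (Pre_part_one banks) := by
  unfold Pre_part_one; infer_instance

def pvWitness_part_one : List (List Int) := [[3, 1, 9, 2], [5, 5], [0, 0, 7]]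

def Spec_part_one (banks : List (List Int)) (out : Int) : Prop := out = part_one_alt banks
instance (banks : List (List Int)) (out : Int) : Decidable (Spec_part_one banks out) := by unfold Spec_part_one; infer_instance

-- ===== CLAIM (what is proved, stated in full; the proofs are below) =====
def Claim_equal_part_one : Prop := ∀ (banks : List (List Int)), Dom_part_one banks → Pre_part_one banks → Spec_part_one banks (part_one banks)

-- ===== LEMMAS AND PROOFS =====

-- max of a nonempty list, as both ports compute it (head seeds the running max)
def pvListMax : List Int → Int
  | [] => 0
  | x :: t => t.foldl max x

-- the (first, second) pair both ports produce on a bank admitted by Pre_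
def pvKeyPair (bank : List Int) : Int × Int :=
  let p := bank.dropLast
  let M := pvListMax p
  let J := p.findIdx (fun y => decide (M ≤ y))
  (M, pvListMax (bank.drop (J + 1)))

-- A's inner loop as a structural recursion over the prefix with an index counter
def pvAfold : List Int → Int → Int × Int → Int × Int
  | [], _, st => st
  | d :: p, c, st => pvAfold p (c + 1) (if d > st.1 then (d, c) else st)

-- general fact: a running max over elements all ≤ the seed keeps the seed
theorem pvFoldlMax_of_le : ∀ (p : List Int) (a : Int), (∀ y ∈ p, y ≤ a) → p.foldl max a = a
  | [], _, _ => rfl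
  | d :: p, a, h => by
    simp only [List.foldl_cons]
    rw [max_eq_left (h d (by simp))]
    exact pvFoldlMax_of_le p a (fun y hy => h y (by simp [hy]))

-- pulling one operand of the seed out of a running max
theorem pvFoldlMax_pull : ∀ (p : List Int) (a b : Int), p.foldl max (max b a) = max a (p.foldl max b)
  | [], _, _ => by simp [max_comm]
  | d :: p, a, b => by
    simp only [List.foldl_cons]
    rw [max_right_comm b a d, pvFoldlMax_pull p a (max b d)]

theorem pvListMax_mem (l : List Int) (hne : l ≠ []) : pvListMax l ∈ l := by
  cases l with
  | nil => exact absurd rfl hne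
  | cons x t =>
    rcases PySem.List.foldl_max_mem t x with h | h
    · simp [pvListMax, h]
    · simp [pvListMax, List.mem_cons.mpr (Or.inr h)]

theorem pvLe_listMax (l : List Int) (y : Int) (hy : y ∈ l) : y ≤ pvListMax l := by
  cases l with
  | nil => simp at hy
  | cons x t =>
    rcases List.mem_cons.mp hy with h | h
    · simpa [pvListMax, h] using (PySem.List.le_foldl_max t y).1
    · exact (PySem.List.le_foldl_max t x).2 y h

-- the 0-seeded running max A uses versus the head-seeded one
theorem pvFoldl0_eq (l : List Int) (hne : l ≠ []) : l.foldl max 0 = max 0 (pvListMax l) := by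
  cases l with
  | nil => exact absurd rfl hne
  | cons x t =>
    simp only [List.foldl_cons, pvListMax]
    rw [show max 0 x = max x 0 from max_comm 0 x, pvFoldlMax_pull]

theorem pvAfold_const : ∀ (p : List Int) (c : Int) (m j : Int), (∀ y ∈ p, y ≤ m) →
    pvAfold p c (m, j) = (m, j)
  | [], _, _, _, _ => rfl
  | d :: p, c, m, j, h => by
    have hd : ¬ d > m := by simpa using h d (by simp)
    simp only [pvAfold, hd, if_false]
    exact pvAfold_const p (c + 1) m j (fun y hy => h y (by simp [hy]))

theorem pvAfold_char : ∀ (p : List Int) (c m j : Int), (∃ y ∈ p, m < y) →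
    pvAfold p c (m, j) =
      (p.foldl max m, c + p.findIdx (fun y => decide (p.foldl max m ≤ y)))
  | [], c, m, j, h => by simp at h
  | d :: p, c, m, j, h => by
    by_cases hd : d > m
    · simp only [pvAfold, hd, if_true]
      by_cases hall : ∀ y ∈ p, y ≤ d
      · rw [pvAfold_const p (c + 1) d c hall]
        have hM : (d :: p).foldl max m = d := by
          simp only [List.foldl_cons]
          rw [max_eq_right (le_of_lt hd)]
          exact pvFoldlMax_of_le p d hall
        rw [hM, List.findIdx_cons]
        simp
      · push Not at hall
        obtain ⟨y, hy, hdy⟩ := hall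
        rw [pvAfold_char p (c + 1) d c ⟨y, hy, hdy⟩]
        have hM : (d :: p).foldl max m = p.foldl max d := by
          simp only [List.foldl_cons]
          rw [max_eq_right (le_of_lt hd)]
        have hMd : d < p.foldl max d := lt_of_lt_of_le hdy ((PySem.List.le_foldl_max p d).2 y hy)
        rw [hM, List.findIdx_cons]
        simp only [not_le.mpr hMd, decide_false, cond_false, Prod.mk.injEq, true_and]
        push_cast
        ring
    · push Not at hd
      obtain ⟨y, hy, hmy⟩ := h
      have hyp : y ∈ p := by
        rcases List.mem_cons.mp hy with h1 | h1
        · exact absurd (h1 ▸ hmy) (not_lt.mpr hd)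
        · exact h1
      simp only [pvAfold, show ¬ d > m from not_lt.mpr hd, if_false]
      rw [pvAfold_char p (c + 1) m j ⟨y, hyp, hmy⟩]
      have hM : (d :: p).foldl max m = p.foldl max m := by
        simp only [List.foldl_cons]
        rw [max_eq_left hd]
      have hMd : d < p.foldl max m := lt_of_le_of_lt hd (lt_of_lt_of_le hmy ((PySem.List.le_foldl_max p m).2 y hyp))
      rw [hM, List.findIdx_cons]
      simp only [not_le.mpr hMd, decide_false, cond_false, Prod.mk.injEq, true_and]
      push_cast
      ring

-- on a prefix admitted by Pre_, A's scan lands on (prefix max, its first index)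
theorem pvAfold_pre (p : List Int) (hne : p ≠ [])
    (hh : (∃ y ∈ p, 0 < y) ∨ 0 ≤ p.headI) :
    pvAfold p 0 (0, 0) =
      (pvListMax p, (p.findIdx (fun y => decide (pvListMax p ≤ y)) : Int)) := by
  by_cases hpos : ∃ y ∈ p, 0 < y
  · obtain ⟨y, hy, h1⟩ := hpos
    rw [pvAfold_char p 0 0 0 ⟨y, hy, h1⟩]
    have hM : p.foldl max 0 = pvListMax p := by
      rw [pvFoldl0_eq p hne, max_eq_right (le_trans (le_of_lt h1) (pvLe_listMax p y hy))]
    rw [hM]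
    simp
  · have hall : ∀ y ∈ p, y ≤ 0 := by
      intro y hy
      by_contra hc
      exact hpos ⟨y, hy, by omega⟩
    rcases hh with h | hhead
    · exact absurd h hpos
    · cases p with
      | nil => exact absurd rfl hne
      | cons x t =>
        have hx0 : x = 0 := le_antisymm (hall x (by simp)) (by simpa using hhead)
        have hM0 : pvListMax (x :: t) = 0 := by
          refine le_antisymm (hall _ (pvListMax_mem (x :: t) (by simp))) ?_
          simpa [hx0] using pvLe_listMax (x :: t) x (by simp)
        rw [pvAfold_const (x :: t) 0 0 0 hall, hM0, List.findIdx_cons]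
        simp [hx0]

theorem pvJ_lt (p : List Int) (hne : p ≠ []) :
    p.findIdx (fun y => decide (pvListMax p ≤ y)) < p.length :=
  List.findIdx_lt_length_of_exists ⟨pvListMax p, pvListMax_mem p hne, by simp⟩

theorem pvA_bridge (bank : List Int) : ∀ (n k : Nat) (st : Int × Int),
    bank.length - 1 - k = n →
    (PySem.List.pyRange (k : Int) ((bank.length : Int) - 1) 1).foldl
      (fun (mdi : Int × Int) idx =>
        let digit := (PySem.List.pyGet? bank idx).getD 0
        if digit > mdi.1 then (digit, idx) else mdi) st
    = pvAfold (bank.dropLast.drop k) (k : Int) st := by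
  intro n
  induction n with
  | zero =>
    intro k st hk
    have h1 : (bank.length : Int) - 1 ≤ (k : Int) := by omega
    rw [PySem.List.pyRange_one_eq_nil h1, List.foldl_nil]
    have h2 : bank.dropLast.drop k = [] := by
      apply List.drop_eq_nil_of_le
      simp [List.length_dropLast]; omega
    rw [h2]; rfl
  | succ n ih =>
    intro k st hk
    have hlt : (k : Int) < (bank.length : Int) - 1 := by omega
    have hkl : k < bank.length := by omega
    have hkd : k < bank.dropLast.length := by simp [List.length_dropLast]; omega
    rw [PySem.List.pyRange_one_cons hlt, List.foldl_cons]
    rw [List.drop_eq_getElem_cons hkd]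
    simp only [pvAfold]
    have hget : (PySem.List.pyGet? bank (k : Int)).getD 0 = bank[k] := by
      rw [PySem.List.pyGet?_natCast, List.getElem?_eq_getElem hkl, Option.getD_some]
    have hgd : bank.dropLast[k] = bank[k] := List.getElem_dropLast ..
    rw [hget, hgd]
    have := ih (k + 1) (if bank[k] > st.1 then (bank[k], (k : Int)) else st) (by omega)
    push_cast at this
    exact this

theorem pvMax?_listMax (l : List Int) (hne : l ≠ []) :
    (PySem.List.max? l (fun y => y)).getD 0 = pvListMax l := by
  cases l with
  | nil => exact absurd rfl hne
  | cons x t => rw [PySem.List.max?_id_cons]; rfl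

-- A's per-bank value in terms of pvKeyPair
theorem pvA_bank (bank : List Int) (h2 : 2 ≤ bank.length)
    (hh : (∃ y ∈ bank.dropLast, 0 < y) ∨ 0 ≤ bank.dropLast.headI) :
    (let num_digits : Int := bank.length
     let mdi : Int × Int :=
       (PySem.List.pyRange 0 (num_digits - 1) 1).foldl
         (fun (mdi : Int × Int) idx =>
           let digit := (PySem.List.pyGet? bank idx).getD 0
           if digit > mdi.1 then (digit, idx) else mdi)
         (0, 0)
     let second := (PySem.List.max? (PySem.List.slice bank (some (mdi.2 + 1)) none) (fun y => y)).getD 0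
     (PySem.Int.ofChars? (PySem.Int.toChars mdi.1 ++ PySem.Int.toChars second)).getD 0)
    = (PySem.Int.ofChars? (PySem.Int.toChars (pvKeyPair bank).1 ++
        PySem.Int.toChars (pvKeyPair bank).2)).getD 0 := by
  simp only []
  have hpne : bank.dropLast ≠ [] := by
    have : bank.dropLast.length ≠ 0 := by simp [List.length_dropLast]; omega
    exact fun h => this (by simp [h])
  have hbr := pvA_bridge bank (bank.length - 1) 0 (0, 0) (by omega)
  push_cast at hbr
  rw [hbr, List.drop_zero, pvAfold_pre bank.dropLast hpne hh]
  set M := pvListMax bank.dropLast with hM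
  set J := bank.dropLast.findIdx (fun y => decide (M ≤ y)) with hJ
  have hJlt : J < bank.dropLast.length := pvJ_lt bank.dropLast hpne
  have hJb : J + 1 < bank.length := by
    have h := hJlt
    simp only [List.length_dropLast] at h
    omega
  have hsl : PySem.List.slice bank (some ((J : Int) + 1)) none = bank.drop (J + 1) := by
    rw [PySem.List.slice_from bank (by positivity)]
    congr 1
  have hdne : bank.drop (J + 1) ≠ [] := by
    intro h
    rw [List.drop_eq_nil_iff] at h
    omega
  rw [hsl, pvMax?_listMax _ hdne]
  rfl

-- splitting a bank of length ≥ 2 as ys ++ [a, b]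
theorem pvSplit2 (bank : List Int) (h2 : 2 ≤ bank.length) :
    ∃ ys a b, bank = ys ++ [a, b] := by
  rcases hr : bank.reverse with _ | ⟨b, t⟩
  · have : bank = [] := by simpa using congrArg List.reverse hr
    simp [this] at h2
  · rcases ht : t with _ | ⟨a, ys'⟩
    · have : bank = [b] := by
        have := congrArg List.reverse hr
        simpa [ht] using this
      simp [this] at h2
    · refine ⟨ys'.reverse, a, b, ?_⟩
      have := congrArg List.reverse hr
      simpa [ht] using this

-- pvListMax and pvKeyPair under a cons
theorem pvListMax_cons (x : Int) (rest : List Int) (hne : rest ≠ []) :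
    pvListMax (x :: rest) = max x (pvListMax rest) := by
  cases rest with
  | nil => exact absurd rfl hne
  | cons r rr =>
    simp only [pvListMax, List.foldl_cons]
    rw [show max x r = max r x from max_comm x r, pvFoldlMax_pull]

theorem pvKeyPair_cons (x : Int) (rest : List Int) (hp : rest.dropLast ≠ []) :
    pvKeyPair (x :: rest) =
      if x ≥ (pvKeyPair rest).1 then (x, pvListMax rest) else pvKeyPair rest := by
  have hne : rest ≠ [] := fun h => hp (by simp [h])
  simp only [pvKeyPair, List.dropLast_cons_of_ne_nil hne]
  rw [pvListMax_cons x rest.dropLast hp]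
  set M' := pvListMax rest.dropLast with hM'
  by_cases hx : M' ≤ x
  · rw [max_eq_left hx]
    have h0 : (x :: rest.dropLast).findIdx (fun y => decide (x ≤ y)) = 0 := by
      rw [List.findIdx_cons]; simp
    rw [h0]
    simp [ge_iff_le, hx]
  · rw [max_eq_right (le_of_lt (not_le.mp hx))]
    have h1 : (x :: rest.dropLast).findIdx (fun y => decide (M' ≤ y))
        = rest.dropLast.findIdx (fun y => decide (M' ≤ y)) + 1 := by
      rw [List.findIdx_cons]
      simp [hx]
    rw [h1]
    simp only [ge_iff_le, hx, if_false]
    rfl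

-- B's right-to-left pass lands on (pvKeyPair, overall max)
theorem pvB_fold : ∀ (ys : List Int) (a b : Int),
    ys.foldr (fun x (st : Int × Int × Int) =>
        let fs := if x ≥ st.1 then (x, st.2.2) else (st.1, st.2.1)
        (fs.1, fs.2, max st.2.2 x)) (a, b, max a b)
    = ((pvKeyPair (ys ++ [a, b])).1, (pvKeyPair (ys ++ [a, b])).2, pvListMax (ys ++ [a, b]))
  | [], a, b => by
    simp only [List.foldr_nil, pvKeyPair, pvListMax, List.nil_append]
    simp
  | x :: ys, a, b => by
    rw [List.foldr_cons, pvB_fold ys a b]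
    have hp : (ys ++ [a, b]).dropLast ≠ [] := by
      have : (ys ++ [a, b]).dropLast = ys ++ [a] := by
        rw [show ys ++ [a, b] = (ys ++ [a]) ++ [b] by simp, List.dropLast_concat]
      simp [this]
    have hne : ys ++ [a, b] ≠ [] := by simp
    rw [show x :: ys ++ [a, b] = x :: (ys ++ [a, b]) from rfl,
        pvKeyPair_cons x (ys ++ [a, b]) hp, pvListMax_cons x (ys ++ [a, b]) hne]
    by_cases hx : x ≥ (pvKeyPair (ys ++ [a, b])).1
    · simp only [hx, if_true]
      exact Prod.ext rfl (Prod.ext rfl (max_comm _ _))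
    · simp only [hx, if_false]
      exact Prod.ext rfl (Prod.ext rfl (max_comm _ _))

-- B's per-bank value in terms of pvKeyPair
theorem pvB_bank (bank : List Int) (h2 : 2 ≤ bank.length) :
    (let rev := (PySem.List.slice? bank none none (-1)).getD []
     let first := (PySem.List.pyGet? rev 1).getD 0
     let second := (PySem.List.pyGet? rev 0).getD 0
     let suffix_max := max first second
     let st := (PySem.List.slice rev (some 2) none).foldl
       (fun (st : Int × Int × Int) x =>
         let fs := if x ≥ st.1 then (x, st.2.2) else (st.1, st.2.1)
         (fs.1, fs.2, max st.2.2 x)) (first, second, suffix_max)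
     (PySem.Int.ofChars? (PySem.Int.toChars st.1 ++ PySem.Int.toChars st.2.1)).getD 0)
    = (PySem.Int.ofChars? (PySem.Int.toChars (pvKeyPair bank).1 ++
        PySem.Int.toChars (pvKeyPair bank).2)).getD 0 := by
  obtain ⟨ys, a, b, rfl⟩ := pvSplit2 bank h2
  simp only []
  rw [PySem.List.slice?_none_none_neg_one, Option.getD_some]
  have hrev : (ys ++ [a, b]).reverse = b :: a :: ys.reverse := by simp
  rw [hrev]
  have h1 : (PySem.List.pyGet? (b :: a :: ys.reverse) 1).getD 0 = a := by
    rw [PySem.List.pyGet?_of_nonneg (b :: a :: ys.reverse) (by norm_num)]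
    rfl
  have h0' : (PySem.List.pyGet? (b :: a :: ys.reverse) 0).getD 0 = b := by
    rw [PySem.List.pyGet?_zero]
    rfl
  have hsl : PySem.List.slice (b :: a :: ys.reverse) (some 2) none = ys.reverse := by
    rw [PySem.List.slice_from (b :: a :: ys.reverse) (by norm_num)]
    rfl
  rw [h1, h0', hsl, List.foldl_reverse, pvB_fold ys a b]

-- ===== VERDICT (by name: the statement is the Claim_ definition above) =====
theorem part_one_spec : Claim_equal_part_one := by
  intro banks _ hpre
  unfold Spec_part_one part_one part_one_alt
  apply PySem.List.foldl_congr_mem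
  intro acc bank hmem
  obtain ⟨h2, hh, _⟩ := hpre bank hmem
  simp only []
  rw [pvA_bank bank h2 hh, pvB_bank bank h2]
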